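-- pv_equiv track=rewrite | github.com/s3bw/foolscap | foolscap/meta_data/parse_note.py | parse_sub_headings
-- ===== SOURCE A (Python) =====
-- def double_items(iterable):
--     """ Given [1, 2, 3]
--
--     Returns [1, 1, 2, 2, 3, 3]
--     """
--     return [item for tup in zip(iterable, iterable) for item in tup]
--
-- def index_pairs(indexes, content):
--     """ We extract the generator contents and remove
--         the first pair.
--
--     The first pair won't have a title as it's
--        between the start and first section the
--        content here should likely be an introduction
--        for the entire note.
--     """
--     start = [1]
--     end = [len(content) - 1]
--
--     indexes = start + double_items(indexes) + end
--     paired = pairwise(indexes)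
--     return [n for n in paired][1:]
--
-- def index_sub_headings(content):
--     """ A note with the following, will return [10]
--
--         10.. Section 1:
--         11.. :A new section
--     """
--     return [index + 1
--             for index, line in enumerate(content[2:])
--             if line and line[0] == ':']
--
-- def parse_sub_headings(content):
--     """ Index such as [10]
--     will return [("section title", "section description", 10, int:[end])]
--
--     From note:
--         10.. Section 1:
--         11.. :A new section
--     """
--     heading_indexs = index_sub_headings(content)
--     if heading_indexs:
--         index_pair = index_pairs(heading_indexs, content)
--         content_title = "Content line {}:"
--
--         return [
--             (content[start], content[start + 1], start, end)
--             if content[start]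
--             else (content_title.format(start), content[start + 1], start, end)
--             for start, end in index_pair
--         ]
--
-- def pairwise(iterable):
--     """ Pairs even length iterables.
--
--     Returns:
--         (:obj:list[tuple]) paired tuples
--
--     Example:
--         >>> pairwise([1, 2, 3, 4])
--         [(1, 2), (3, 4)]
--     """
--     # Do I throw error for odd length iterable?
--     a = iter(iterable)
--     return zip(a, a)
-- ===== SOURCE B (Python) =====
-- def _section(content, start, end):
--     title = content[start] if content[start] else "Content line {}:".format(start)
--     return (title, content[start + 1], start, end)
--
-- def parse_sub_headings(content):
--     result = []
--     prev = None
--     for pos in range(2, len(content)):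
--         line = content[pos]
--         if line and line[0] == ':':
--             if prev is not None:
--                 result.append(_section(content, prev, pos - 1))
--             prev = pos - 1
--     if prev is None:
--         return None
--     result.append(_section(content, prev, len(content) - 1))
--     return result
-- ===== Notes on version B (the rewrite author's own statement) =====
-- stated objective: simpler
-- what changed: Replaces A's index-duplication pipeline (double_items + iterator-pairwise + drop-first-pair) and the final pair-indexing comprehension by one left-to-right pass over the line positions that emits a finished section each time the next sub-heading is met.
import Mathlib
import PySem

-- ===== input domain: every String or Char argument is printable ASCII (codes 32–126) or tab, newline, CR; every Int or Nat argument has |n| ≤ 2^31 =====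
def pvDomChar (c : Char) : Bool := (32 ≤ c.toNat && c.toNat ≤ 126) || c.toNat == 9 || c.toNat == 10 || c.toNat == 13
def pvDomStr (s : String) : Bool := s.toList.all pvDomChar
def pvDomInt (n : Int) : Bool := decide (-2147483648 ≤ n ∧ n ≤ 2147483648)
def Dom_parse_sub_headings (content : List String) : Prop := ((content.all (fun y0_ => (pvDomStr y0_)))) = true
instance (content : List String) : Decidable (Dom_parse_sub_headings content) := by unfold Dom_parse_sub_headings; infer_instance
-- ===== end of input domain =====

-- B replaces A's double_items/pairwise/drop-first pair machinery and final comprehension by a single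
-- left-to-right pass that closes a section each time the next sub-heading is met (objective: simpler).

-- ===== PORT A =====
-- double_items
def pvDouble (l : List Int) : List Int :=
  (l.zip l).flatMap (fun t => [t.1, t.2])

-- pairwise: zip(a, a) over one shared iterator pairs consecutive elements
def pvPairwise : List Int → List (Int × Int)
  | a :: b :: rest => (a, b) :: pvPairwise rest
  | _ => []

-- index_pairs
def pvIndexPairs (indexes : List Int) (content : List String) : List (Int × Int) :=
  let start : List Int := [1]
  let stop : List Int := [(content.length : Int) - 1]
  let idxs := start ++ pvDouble indexes ++ stop
  PySem.List.slice (pvPairwise idxs) (some 1) none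

-- index_sub_headings
def pvIndexSubHeadings (content : List String) : List Int :=
  ((PySem.List.enumerate (PySem.List.slice content (some 2) none) 0).filter
      (fun p => p.2 != "" && (PySem.Str.pyGet? p.2 0 == some ':'))).map (fun p => p.1 + 1)

-- content[start] / content[start+1] via pyGetD: every pair produced by index_pairs from the
-- nonempty heading list has 1 ≤ start ≤ len-2, so the Python indexing never raises.
def parse_sub_headings (content : List String) : Option (List (String × String × Int × Int)) :=
  let heading_indexs := pvIndexSubHeadings content
  if heading_indexs ≠ [] then
    let index_pair := pvIndexPairs heading_indexs content
    some (index_pair.map (fun p =>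
      if PySem.List.pyGetD content p.1 "" ≠ "" then
        (PySem.List.pyGetD content p.1 "", PySem.List.pyGetD content (p.1 + 1) "", p.1, p.2)
      else
        ("Content line " ++ PySem.Int.toStr p.1 ++ ":",
         PySem.List.pyGetD content (p.1 + 1) "", p.1, p.2)))
  else none

-- ===== PORT B =====
def pvAltSection (content : List String) (start fin : Int) : String × String × Int × Int :=
  let s := PySem.List.pyGetD content start ""
  (if s ≠ "" then s else "Content line " ++ PySem.Int.toStr start ++ ":",
   PySem.List.pyGetD content (start + 1) "", start, fin)

def pvAltLoop (content : List String) :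
    List Int → List (String × String × Int × Int) × Option Int →
    List (String × String × Int × Int) × Option Int
  | [], st => st
  | pos :: rest, st =>
    let line := PySem.List.pyGetD content pos ""
    if line != "" && (PySem.Str.pyGet? line 0 == some ':') then
      match st.2 with
      | some p => pvAltLoop content rest (st.1 ++ [pvAltSection content p (pos - 1)], some (pos - 1))
      | none => pvAltLoop content rest (st.1, some (pos - 1))
    else pvAltLoop content rest st

def parse_sub_headings_alt (content : List String) : Option (List (String × String × Int × Int)) :=
  let r := pvAltLoop content (PySem.List.pyRange 2 (content.length : Int) 1) ([], none)
  match r.2 with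
  | none => none
  | some p => some (r.1 ++ [pvAltSection content p ((content.length : Int) - 1)])

-- ===== PRECONDITION & SPEC =====
def Spec_parse_sub_headings (content : List String) (out : Option (List (String × String × Int × Int))) : Prop := out = parse_sub_headings_alt content
instance (content : List String) (out : Option (List (String × String × Int × Int))) : Decidable (Spec_parse_sub_headings content out) := by unfold Spec_parse_sub_headings; infer_instance

-- ===== CLAIM (what is proved, stated in full; the proofs are below) =====
def Claim_equal_parse_sub_headings : Prop := ∀ (content : List String), Dom_parse_sub_headings content → Spec_parse_sub_headings content (parse_sub_headings content)

-- ===== LEMMAS AND PROOFS =====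

-- the section starts B's loop detects among positions ps
def pvStarts (content : List String) (ps : List Int) : List Int :=
  (ps.filter (fun pos =>
    let line := PySem.List.pyGetD content pos ""
    line != "" && (PySem.Str.pyGet? line 0 == some ':'))).map (fun pos => pos - 1)

theorem pvAltLoop_some (content : List String) : ∀ (ps : List Int)
    (res : List (String × String × Int × Int)) (p : Int),
    pvAltLoop content ps (res, some p) =
      (res ++ (List.zip (p :: pvStarts content ps) (pvStarts content ps)).map
          (fun q => pvAltSection content q.1 q.2),
       some ((pvStarts content ps).getLastD p)) := by
  intro ps
  induction ps with
  | nil => intro res p; simp [pvAltLoop, pvStarts]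
  | cons q rest ih =>
    intro res p
    by_cases h : ((PySem.List.pyGetD content q "") != "" && (PySem.Str.pyGet? (PySem.List.pyGetD content q "") 0 == some ':')) = true
    · have hS : pvStarts content (q :: rest) = (q - 1) :: pvStarts content rest := by
        simp only [pvStarts, List.filter_cons, h, if_true, List.map_cons]
      simp only [pvAltLoop, h, if_true]
      rw [ih, hS, List.getLastD_cons, List.zip_cons_cons, List.map_cons]
      simp [List.append_assoc]
    · rw [Bool.not_eq_true] at h
      have hS : pvStarts content (q :: rest) = pvStarts content rest := by
        simp only [pvStarts, List.filter_cons, h, Bool.false_eq_true, if_false]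
      simp only [pvAltLoop, h, Bool.false_eq_true, if_false]
      rw [ih, hS]

theorem pvAltLoop_none (content : List String) : ∀ (ps : List Int)
    (res : List (String × String × Int × Int)),
    pvAltLoop content ps (res, none) =
      (match pvStarts content ps with
       | [] => (res, none)
       | s :: S' => (res ++ (List.zip (s :: S') S').map (fun q => pvAltSection content q.1 q.2),
                     some (S'.getLastD s))) := by
  intro ps
  induction ps with
  | nil => intro res; simp [pvAltLoop, pvStarts]
  | cons q rest ih =>
    intro res
    by_cases h : ((PySem.List.pyGetD content q "") != "" && (PySem.Str.pyGet? (PySem.List.pyGetD content q "") 0 == some ':')) = true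
    · have hS : pvStarts content (q :: rest) = (q - 1) :: pvStarts content rest := by
        simp only [pvStarts, List.filter_cons, h, if_true, List.map_cons]
      simp only [pvAltLoop, h, if_true]
      rw [pvAltLoop_some, hS]
    · rw [Bool.not_eq_true] at h
      have hS : pvStarts content (q :: rest) = pvStarts content rest := by
        simp only [pvStarts, List.filter_cons, h, Bool.false_eq_true, if_false]
      simp only [pvAltLoop, h, Bool.false_eq_true, if_false]
      rw [ih, hS]

theorem pvZip_tail_append : ∀ (S' : List Int) (s c : Int),
    List.zip (s :: S') (S' ++ [c]) = List.zip (s :: S') S' ++ [(S'.getLastD s, c)] := by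
  intro S'
  induction S' with
  | nil => intro s c; rfl
  | cons x t ih =>
    intro s c
    simp only [List.cons_append, List.zip_cons_cons, ih, List.getLastD_cons]

theorem pvPairwise_doubled : ∀ (h : List Int) (a L : Int),
    pvPairwise (a :: (pvDouble h ++ [L])) = List.zip (a :: h) (h ++ [L]) := by
  intro h
  induction h with
  | nil => intro a L; rfl
  | cons x t ih =>
    intro a L
    show pvPairwise (a :: x :: ((x :: pvDouble t) ++ [L])) = _
    rw [show pvPairwise (a :: x :: ((x :: pvDouble t) ++ [L])) = (a, x) :: pvPairwise (x :: (pvDouble t ++ [L])) from rfl, ih]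
    rfl

theorem pvGetD_drop2 (content : List String) (k : Nat) :
    PySem.List.pyGetD (content.drop 2) (k : Int) "" = PySem.List.pyGetD content (2 + (k : Int)) "" := by
  have h2 : (2 + (k : Int)) = ((2 + k : Nat) : Int) := by push_cast; ring
  rw [h2, PySem.List.pyGetD_natCast, PySem.List.pyGetD_natCast]
  simp [List.getD_eq_getElem?_getD, List.getElem?_drop]

theorem pvHeads_eq (content : List String) :
    pvIndexSubHeadings content =
      pvStarts content (PySem.List.pyRange 2 (content.length : Int) 1) := by
  unfold pvIndexSubHeadings pvStarts
  rw [PySem.List.slice_from content (by norm_num),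
      PySem.List.enumerate_eq_map_pyRange _ "",
      PySem.List.pyRange_one 0, PySem.List.pyRange_one 2]
  simp only [List.filter_map, List.map_map]
  have hN : ((PySem.List.len (List.drop (2:Int).toNat content)) - 0).toNat
      = (((content.length : Int)) - 2).toNat := by
    simp [PySem.List.len]
    omega
  rw [hN]
  congr 1
  · funext k
    simp only [Function.comp_apply]
    omega
  · congr 1
    funext k
    simp only [Function.comp_apply]
    rw [show ((0:Int) + (k:Int)) = (k:Int) by ring,
        show ((2:Int).toNat) = 2 by rfl, pvGetD_drop2]

theorem pvSec_eq (content : List String) (p : Int × Int) :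
    (if PySem.List.pyGetD content p.1 "" ≠ "" then
        (PySem.List.pyGetD content p.1 "", PySem.List.pyGetD content (p.1 + 1) "", p.1, p.2)
      else
        ("Content line " ++ PySem.Int.toStr p.1 ++ ":",
         PySem.List.pyGetD content (p.1 + 1) "", p.1, p.2))
      = pvAltSection content p.1 p.2 := by
  unfold pvAltSection
  by_cases h : PySem.List.pyGetD content p.1 "" ≠ "" <;> simp [h]

-- ===== VERDICT (by name: the statement is the Claim_ definition above) =====
theorem parse_sub_headings_spec : Claim_equal_parse_sub_headings := by
  intro content _
  show parse_sub_headings content = parse_sub_headings_alt content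
  simp only [parse_sub_headings, parse_sub_headings_alt, pvHeads_eq content,
    pvAltLoop_none content]
  rcases pvStarts content (PySem.List.pyRange 2 (content.length : Int) 1) with _ | ⟨s, S'⟩
  · simp
  · rw [if_pos (by simp)]
    simp only [pvIndexPairs]
    rw [show ([1] ++ pvDouble (s :: S') ++ [(content.length : Int) - 1])
          = (1 : Int) :: (pvDouble (s :: S') ++ [(content.length : Int) - 1]) by simp,
        pvPairwise_doubled, PySem.List.slice_from_one,
        show ((s :: S') ++ [(content.length : Int) - 1])
          = s :: (S' ++ [(content.length : Int) - 1]) by simp,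
        List.zip_cons_cons, List.tail_cons, pvZip_tail_append, List.map_append]
    simp only [List.map_cons, List.map_nil, pvSec_eq]
    simp
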